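-- pv_equiv track=rewrite | github.com/denteyon/AlgoDeepDive | PlayGround/IdenticalDistribution.py | minDifferent
-- ===== SOURCE A (Python) =====
-- def minDifferent(snacks):
--     n = len(snacks)
--     ans = n
--     M = max(snacks)
--     cnt = [0] * (M+1)
--
--     for i in range(n):
--         cnt[snacks[i]] = cnt[snacks[i]] + 1
--
--     for d in range(2, M + 1):
--         s = 0
--         for i in range(M+1):
--             if s<ans:
--                 s += cnt[i]*((d-(i%d))%d)
--         ans = min(ans, s)
--
--     return ans;
-- ===== SOURCE B (Python) =====
-- def minDifferent(snacks):
--     best = len(snacks)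
--     for d in range(2, max(snacks) + 1):
--         cost = 0
--         for v in snacks:
--             cost += (-v) % d
--         if cost < best:
--             best = cost
--     return best
-- ===== Notes on version B (the rewrite author's own statement) =====
-- stated objective: simpler
-- what changed: B drops A's counting array and pruned scan over the whole value range 0..M and instead, for each candidate divisor d, sums (-v)%d directly over the snack list, keeping a running minimum.
-- outside the precondition, e.g. on minDifferent([-1, 3]): A returns 0, B returns 1
import Mathlib
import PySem

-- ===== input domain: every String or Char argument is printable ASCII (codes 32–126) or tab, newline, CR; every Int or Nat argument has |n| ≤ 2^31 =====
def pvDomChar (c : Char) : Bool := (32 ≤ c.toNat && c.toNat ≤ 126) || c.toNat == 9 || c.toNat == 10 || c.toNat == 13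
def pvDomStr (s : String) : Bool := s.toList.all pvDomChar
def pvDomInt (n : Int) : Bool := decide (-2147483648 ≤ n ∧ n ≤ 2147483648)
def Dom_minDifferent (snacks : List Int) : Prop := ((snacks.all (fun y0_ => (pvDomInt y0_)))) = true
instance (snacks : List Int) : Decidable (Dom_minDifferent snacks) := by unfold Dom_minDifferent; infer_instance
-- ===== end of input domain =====

-- One honest line: B replaces A's counting array + pruned scan over the value range by a direct
-- per-divisor sum of (-v) % d over the snack list (objective: simpler).

-- ===== PORT A =====
def minDifferent (snacks : List Int) : Int :=
  let n : Int := (snacks.length : Int)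
  let ans : Int := n
  match PySem.List.max? snacks (fun x => x) with
  | none => 0   -- unreachable under Pre_: max([]) raises ValueError
  | some M =>
    let cnt : List Int := List.replicate (M + 1).toNat 0
    let cnt := (PySem.List.pyRange 0 n 1).foldl
      (fun cnt i =>
        let v := PySem.List.pyGetD snacks i 0
        PySem.List.pySetD cnt v (PySem.List.pyGetD cnt v 0 + 1)) cnt
    let ans := (PySem.List.pyRange 2 (M + 1) 1).foldl
      (fun ans d =>
        let s := (PySem.List.pyRange 0 (M + 1) 1).foldl
          (fun s i =>
            if s < ans then
              s + PySem.List.pyGetD cnt i 0 * PySem.Int.mod (d - PySem.Int.mod i d) d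
            else s) 0
        min ans s) ans
    ans

-- ===== PORT B =====
def minDifferent_alt (snacks : List Int) : Int :=
  let best : Int := (snacks.length : Int)
  match PySem.List.max? snacks (fun x => x) with
  | none => 0   -- unreachable under Pre_: max([]) raises ValueError
  | some top =>
    (PySem.List.pyRange 2 (top + 1) 1).foldl
      (fun best d =>
        let cost := snacks.foldl (fun cost v => cost + PySem.Int.mod (-v) d) 0
        if cost < best then cost else best) best

-- ===== PRECONDITION & SPEC =====
-- Pre_ excludes the empty list (max([]) raises ValueError) and lists with a negative element:
-- there A either raises IndexError (cnt index below -(max+1)) or counts the value at a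
-- wrapped-around position of cnt, an accident of Python's negative indexing outside the
-- natural domain (snack values are nonnegative).
def Pre_minDifferent (snacks : List Int) : Prop :=
  snacks ≠ [] ∧ ∀ x ∈ snacks, 0 ≤ x
instance (snacks : List Int) : Decidable (Pre_minDifferent snacks) := by
  unfold Pre_minDifferent; infer_instance

def pvWitness_minDifferent : List Int := [2, 3]

def Spec_minDifferent (snacks : List Int) (out : Int) : Prop := out = minDifferent_alt snacks
instance (snacks : List Int) (out : Int) : Decidable (Spec_minDifferent snacks out) := by
  unfold Spec_minDifferent; infer_instance

-- ===== CLAIM (what is proved, stated in full; the proofs are below) =====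
def Claim_equal_minDifferent : Prop := ∀ (snacks : List Int), Dom_minDifferent snacks →
  Pre_minDifferent snacks → Spec_minDifferent snacks (minDifferent snacks)

-- ===== LEMMAS AND PROOFS =====

-- the modulus identity behind B's per-element term: for 0 < d, (d - v % d) % d = (-v) % d
lemma mod_sub_mod_eq_neg_mod (v d : Int) (hd : 0 < d) :
    PySem.Int.mod (d - PySem.Int.mod v d) d = PySem.Int.mod (-v) d := by
  have h := fun a => PySem.Int.mod_eq_emod_of_pos (a := a) (b := d) hd
  rw [h, h, h]
  conv_lhs => rw [Int.sub_emod, Int.emod_emod_of_dvd _ dvd_rfl, ← Int.sub_emod]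
  have h2 : d - v = -v + 1 * d := by ring
  rw [h2]
  exact Int.add_mul_emod_self_right (-v) 1 d

-- once the pruned accumulator has reached ans it never moves again
lemma pruned_foldl_stay (l : List Int) (f : Int → Int) (ans : Int) :
    ∀ s : Int, ¬ s < ans →
      l.foldl (fun s i => if s < ans then s + f i else s) s = s := by
  induction l with
  | nil => intro s _; rfl
  | cons a t ih =>
    intro s hs
    simp only [List.foldl_cons, if_neg hs]
    exact ih s hs

-- A's pruned accumulation, then min with ans, equals min with the full sum
lemma pruned_foldl_min (l : List Int) (f : Int → Int) (hf : ∀ i ∈ l, 0 ≤ f i) :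
    ∀ s ans : Int,
      min ans (l.foldl (fun s i => if s < ans then s + f i else s) s)
        = min ans (s + (l.map f).sum) := by
  induction l with
  | nil => intro s ans; simp
  | cons a t ih =>
    intro s ans
    by_cases hs : s < ans
    · simp only [List.foldl_cons, if_pos hs, List.map_cons, List.sum_cons]
      rw [ih (fun i hi => hf i (List.mem_cons_of_mem a hi)) (s + f a) ans]
      ring_nf
    · simp only [List.foldl_cons, if_neg hs]
      rw [pruned_foldl_stay t f ans s hs]
      have h1 : ans ≤ s := le_of_not_gt hs
      have h2 : 0 ≤ ((a :: t).map f).sum :=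
        List.sum_nonneg (by rintro x hx; obtain ⟨i, hi, rfl⟩ := List.mem_map.mp hx; exact hf i hi)
      rw [min_eq_left h1, min_eq_left (by linarith)]

-- writing to a table that is a map over List.range
lemma pySetD_map_range (L : Nat) (f : Nat → Int) (v x : Int) (hv : 0 ≤ v) :
    PySem.List.pySetD ((List.range L).map f) v x
      = (List.range L).map (fun i => if i = v.toNat then x else f i) := by
  rw [PySem.List.pySetD_of_nonneg _ x hv]
  apply List.ext_getElem
  · simp
  · intro i h1 h2
    simp only [List.getElem_set, List.getElem_map, List.getElem_range]
    simp only [List.length_set, List.length_map, List.length_range] at h1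
    by_cases hi : i = v.toNat
    · simp [hi]
    · simp only [if_neg hi]
      rw [if_neg (fun h => hi h.symm)]

-- reading from a table that is a map over List.range
lemma pyGetD_map_range (L : Nat) (f : Nat → Int) (v : Int) (hv : 0 ≤ v) (hvL : v < (L : Int)) :
    PySem.List.pyGetD ((List.range L).map f) v 0 = f v.toNat := by
  rw [PySem.List.pyGetD_eq_getElem _ 0 hv (by simpa using hvL)]
  simp only [List.getElem_map, List.getElem_range]

-- A's counting loop, started on a table, adds the multiplicities of l
lemma fold_counts (L : Nat) (l : List Int) (hl : ∀ v ∈ l, 0 ≤ v ∧ v < (L : Int)) :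
    ∀ f : Nat → Int,
      l.foldl (fun cnt v => PySem.List.pySetD cnt v (PySem.List.pyGetD cnt v 0 + 1))
          ((List.range L).map f)
        = (List.range L).map (fun i => f i + (l.count ((i : Nat) : Int) : Int)) := by
  induction l with
  | nil => intro f; simp
  | cons a t ih =>
    intro f
    obtain ⟨ha0, haL⟩ := hl a (List.mem_cons_self)
    simp only [List.foldl_cons]
    rw [pyGetD_map_range L f a ha0 haL, pySetD_map_range L f a _ ha0]
    rw [ih (fun v hv => hl v (List.mem_cons_of_mem a hv)) _]
    apply List.map_congr_left
    intro i hi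
    rw [List.count_cons]
    by_cases hia : i = a.toNat
    · have hcast : (a == ((i : Nat) : Int)) = true := by simp only [beq_iff_eq]; omega
      rw [if_pos hia, if_pos hcast, hia]
      push_cast
      ring
    · have hcast : ¬ ((a == ((i : Nat) : Int)) = true) := by
        simp only [beq_iff_eq]; omega
      rw [if_neg hia, if_neg hcast]
      simp

-- summing count(i) * g(i) over the whole value range is summing g over the list
lemma sum_count_mul (L : Nat) (l : List Int) (g : Int → Int)
    (hl : ∀ v ∈ l, 0 ≤ v ∧ v < (L : Int)) :
    ((List.range L).map (fun i => (l.count ((i : Nat) : Int) : Int) * g ((i : Nat) : Int))).sum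
      = (l.map g).sum := by
  induction l with
  | nil => simp
  | cons a t ih =>
    obtain ⟨ha0, haL⟩ := hl a (List.mem_cons_self)
    have hrange : ((List.range L).map (fun i => ((a :: t).count ((i : Nat) : Int) : Int) * g ((i : Nat) : Int))).sum
        = ∑ i ∈ Finset.range L, ((a :: t).count ((i : Nat) : Int) : Int) * g ((i : Nat) : Int) := by
      rfl
    have hrange2 : ((List.range L).map (fun i => (t.count ((i : Nat) : Int) : Int) * g ((i : Nat) : Int))).sum
        = ∑ i ∈ Finset.range L, (t.count ((i : Nat) : Int) : Int) * g ((i : Nat) : Int) := by rfl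
    rw [hrange]
    have hsplit : ∀ i ∈ Finset.range L,
        ((a :: t).count ((i : Nat) : Int) : Int) * g ((i : Nat) : Int)
          = (t.count ((i : Nat) : Int) : Int) * g ((i : Nat) : Int)
            + (if i = a.toNat then g ((i : Nat) : Int) else 0) := by
      intro i _
      rw [List.count_cons]
      by_cases hia : i = a.toNat
      · have hcast : (a == ((i : Nat) : Int)) = true := by simp only [beq_iff_eq]; omega
        rw [if_pos hcast, if_pos hia]
        push_cast
        ring
      · have hcast : ¬ ((a == ((i : Nat) : Int)) = true) := by simp only [beq_iff_eq]; omega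
        rw [if_neg hcast, if_neg hia]
        simp
    rw [Finset.sum_congr rfl hsplit, Finset.sum_add_distrib]
    rw [Finset.sum_ite_eq' (Finset.range L) a.toNat (fun i => g ((i : Nat) : Int))]
    rw [if_pos (Finset.mem_range.mpr (by omega))]
    have hga : g ((a.toNat : Nat) : Int) = g a := by
      congr 1
      omega
    rw [hga, ← hrange2, ih (fun v hv => hl v (List.mem_cons_of_mem a hv))]
    simp [add_comm]

-- ===== VERDICT (by name: the statement is the Claim_ definition above) =====
theorem minDifferent_spec : Claim_equal_minDifferent := by
  intro snacks _ hpre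
  obtain ⟨-, hnn⟩ := hpre
  unfold Spec_minDifferent minDifferent minDifferent_alt
  cases hmax : PySem.List.max? snacks (fun x => x) with
  | none => rfl
  | some M =>
    simp only []
    have hMmem : M ∈ snacks := PySem.List.max?_mem hmax
    have hMmax : ∀ y ∈ snacks, y ≤ M := PySem.List.max?_isMax hmax
    have hM0 : (0:Int) ≤ M := hnn M hMmem
    set L : Nat := (M + 1).toNat with hL
    have hLI : ((L : Nat) : Int) = M + 1 := by omega
    have hbounds : ∀ v ∈ snacks, 0 ≤ v ∧ v < ((L : Nat) : Int) := by
      intro v hv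
      exact ⟨hnn v hv, by have := hMmax v hv; omega⟩
    -- the counting loop builds the multiplicity table of snacks
    have hrep : List.replicate L (0:Int) = (List.range L).map (fun _ => (0:Int)) := by
      simp
    have hcnt :
        (PySem.List.pyRange 0 ((snacks.length : Nat) : Int) 1).foldl
          (fun cnt i =>
            let v := PySem.List.pyGetD snacks i 0
            PySem.List.pySetD cnt v (PySem.List.pyGetD cnt v 0 + 1))
          (List.replicate L (0:Int))
        = (List.range L).map (fun i => (snacks.count ((i : Nat) : Int) : Int)) := by
      rw [hrep,
        PySem.List.foldl_pyRange_zero_pyGetD' snacks 0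
          (fun cnt v => PySem.List.pySetD cnt v (PySem.List.pyGetD cnt v 0 + 1)) _,
        fold_counts L snacks hbounds (fun _ => 0)]
      simp
    rw [hcnt]
    -- the divisor loops agree step by step
    apply PySem.List.foldl_congr_mem
    intro ans d hd
    obtain ⟨hd2, hdM⟩ := PySem.List.mem_pyRange_one.mp hd
    have hdpos : (0:Int) < d := by omega
    -- A's pruned inner loop, under min with ans, is the full sum
    rw [pruned_foldl_min _ _ (by
      intro i hi
      obtain ⟨hi0, hiM⟩ := PySem.List.mem_pyRange_one.mp hi
      have h1 : (0:Int) ≤ PySem.List.pyGetD ((List.range L).map (fun i => (snacks.count ((i : Nat) : Int) : Int))) i 0 := by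
        rw [pyGetD_map_range L _ i hi0 (by omega)]
        positivity
      have h2 : (0:Int) ≤ PySem.Int.mod (d - PySem.Int.mod i d) d := PySem.Int.mod_nonneg _ hdpos
      positivity) 0 ans]
    -- the full sum over the value range is the sum over the list
    have hsum :
        ((PySem.List.pyRange 0 (M + 1) 1).map
          (fun i => PySem.List.pyGetD ((List.range L).map (fun i => (snacks.count ((i : Nat) : Int) : Int))) i 0
            * PySem.Int.mod (d - PySem.Int.mod i d) d)).sum
        = (snacks.map (fun v => PySem.Int.mod (-v) d)).sum := by
      have hMl : M + 1 = ((L : Nat) : Int) := hLI.symm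
      rw [hMl, PySem.List.pyRange_zero_nat L, List.map_map]
      have hptw : ∀ i ∈ List.range L,
          ((fun i => PySem.List.pyGetD ((List.range L).map (fun i => (snacks.count ((i : Nat) : Int) : Int))) i 0
            * PySem.Int.mod (d - PySem.Int.mod i d) d) ∘ (fun k : Nat => (k : Int))) i
          = (snacks.count ((i : Nat) : Int) : Int) * PySem.Int.mod (d - PySem.Int.mod ((i : Nat) : Int) d) d := by
        intro i hi
        have hiL : i < L := List.mem_range.mp hi
        simp only [Function.comp]
        rw [pyGetD_map_range L _ (i : Int) (by omega) (by omega)]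
        simp
      rw [List.map_congr_left hptw,
        sum_count_mul L snacks (fun v => PySem.Int.mod (d - PySem.Int.mod v d) d) hbounds]
      apply congrArg
      apply List.map_congr_left
      intro v _
      exact mod_sub_mod_eq_neg_mod v d hdpos
    rw [hsum, PySem.List.foldl_add snacks (fun v => PySem.Int.mod (-v) d) 0]
    simp only [zero_add]
    rw [min_def]
    split_ifs <;> omega
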